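-- pv_equiv track=rewrite | github.com/goldenretriever2015/tiepvupsu.github.io | md2lt.py | inlinecode
-- ===== SOURCE A (Python) =====
-- def inlinecode(str0):
-- 	id1 = str0.find('`')
-- 	if id1 == -1:
-- 		return str0
--
-- 	str1 = str0[id1 + 1:]
-- 	id2 = str1.find('`')
-- 	if id2 == -1:
-- 		return str0
--
-- 	return str0[:id1] + '\\pythoninline{'+str0[id1+1:id1+id2+1] + '}' + \
-- 			inlinecode(str0[id1+id2+2:])
-- ===== SOURCE B (Python) =====
-- def inlinecode(str0):
--     out = []
--     buf = None  # None = outside a code span; list of chars = inside one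
--     for c in str0:
--         if buf is None:
--             if c == '`':
--                 buf = []
--             else:
--                 out.append(c)
--         elif c == '`':
--             out.append('\\pythoninline{' + ''.join(buf) + '}')
--             buf = None
--         else:
--             buf.append(c)
--     if buf is not None:
--         out.append('`' + ''.join(buf))
--     return ''.join(out)
-- ===== Notes on version B (the rewrite author's own statement) =====
-- stated objective: alternative
-- what changed: Replaced the find/slice tail recursion with a single character-by-character pass driven by an outside/inside-code-span state (an Optional buffer), flushing a wrapped span on each closing backtick and emitting an unmatched trailing backtick verbatim at the end.
import Mathlib
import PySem

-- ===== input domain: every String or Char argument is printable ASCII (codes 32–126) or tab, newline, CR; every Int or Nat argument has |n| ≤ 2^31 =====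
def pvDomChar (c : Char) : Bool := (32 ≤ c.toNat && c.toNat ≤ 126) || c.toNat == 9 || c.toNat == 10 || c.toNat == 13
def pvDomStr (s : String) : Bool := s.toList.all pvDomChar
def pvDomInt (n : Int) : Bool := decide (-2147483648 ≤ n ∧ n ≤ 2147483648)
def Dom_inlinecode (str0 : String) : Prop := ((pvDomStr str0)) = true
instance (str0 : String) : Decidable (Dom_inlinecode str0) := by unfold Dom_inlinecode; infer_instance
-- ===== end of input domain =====

-- B replaces A's find/slice tail recursion by a single character-by-character pass
-- with an outside/inside-code-span state (alternative decomposition; return value only).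

-- ===== PORT A =====
-- helper (termination fact for port A): the unconsumed tail strictly shrinks
theorem pvTailShrink (s : List Char) (h1 : PySem.Chars.find s ['`'] ≠ -1)
    (h2 : PySem.Chars.find (PySem.List.slice s (some (PySem.Chars.find s ['`'] + 1)) none) ['`'] ≠ -1) :
    (PySem.List.slice s (some (PySem.Chars.find s ['`'] + PySem.Chars.find (PySem.List.slice s (some (PySem.Chars.find s ['`'] + 1)) none) ['`'] + 2)) none).length < s.length := by
  have hn1 : 0 ≤ PySem.Chars.find s ['`'] := by
    have := PySem.Chars.neg_one_le_find s ['`']; omega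
  have hn2 : 0 ≤ PySem.Chars.find (PySem.List.slice s (some (PySem.Chars.find s ['`'] + 1)) none) ['`'] := by
    have := PySem.Chars.neg_one_le_find (PySem.List.slice s (some (PySem.Chars.find s ['`'] + 1)) none) ['`']; omega
  have hpos : 1 ≤ s.length := by
    have hin := (PySem.Chars.find_ne_neg_one_iff s ['`']).mp h1
    have := hin.sublist.length_le
    simpa using this
  have hs : PySem.List.slice s (some (PySem.Chars.find s ['`'] + PySem.Chars.find (PySem.List.slice s (some (PySem.Chars.find s ['`'] + 1)) none) ['`'] + 2)) none
      = s.drop (PySem.Chars.find s ['`'] + PySem.Chars.find (PySem.List.slice s (some (PySem.Chars.find s ['`'] + 1)) none) ['`'] + 2).toNat :=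
    PySem.List.slice_from s (by omega)
  rw [hs]
  simp only [List.length_drop]
  omega

def inlinecodeA (s : List Char) : List Char :=
  let id1 := PySem.Chars.find s ['`']
  if h1 : id1 = -1 then s
  else
    let str1 := PySem.List.slice s (some (id1 + 1)) none
    let id2 := PySem.Chars.find str1 ['`']
    if h2 : id2 = -1 then s
    else
      PySem.List.slice s none (some id1) ++ "\\pythoninline{".toList
        ++ PySem.List.slice s (some (id1 + 1)) (some (id1 + id2 + 1)) ++ ['}']
        ++ inlinecodeA (PySem.List.slice s (some (id1 + id2 + 2)) none)
termination_by s.length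
decreasing_by exact pvTailShrink s h1 h2

def inlinecode (str0 : String) : String := String.ofList (inlinecodeA str0.toList)

-- ===== PORT B =====
-- the wrapped span emitted on a closing backtick ('\pythoninline{' + buf + '}')
def pvWrap (b : List Char) : List Char := "\\pythoninline{".toList ++ b ++ ['}']

-- the for-loop over the characters: out accumulator, buf = none (outside) / some b (inside a span)
def inlinecodeBGo (out : List Char) (buf : Option (List Char)) : List Char → List Char
  | [] =>
      match buf with
      | none => out
      | some b => out ++ '`' :: b
  | c :: rest =>
      match buf with
      | none =>
          if c = '`' then inlinecodeBGo out (some []) rest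
          else inlinecodeBGo (out ++ [c]) none rest
      | some b =>
          if c = '`' then inlinecodeBGo (out ++ pvWrap b) none rest
          else inlinecodeBGo out (some (b ++ [c])) rest

def inlinecode_alt (str0 : String) : String :=
  String.ofList (inlinecodeBGo [] none str0.toList)

-- ===== PRECONDITION & SPEC =====
def Spec_inlinecode (str0 : String) (out : String) : Prop := out = inlinecode_alt str0
instance (str0 : String) (out : String) : Decidable (Spec_inlinecode str0 out) := by unfold Spec_inlinecode; infer_instance

-- ===== CLAIM =====
def Claim_equal_inlinecode : Prop := ∀ (str0 : String), Dom_inlinecode str0 → Spec_inlinecode str0 (inlinecode str0)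

-- ===== LEMMAS AND PROOFS =====
-- a singleton is an infix iff its element occurs
theorem pvSingletonInfix (c : Char) (s : List Char) : [c] <:+: s ↔ c ∈ s := by
  constructor
  · intro h; exact (List.singleton_sublist).mp h.sublist
  · intro h
    rcases List.append_of_mem h with ⟨p, t, rfl⟩
    exact ⟨p, t, by simp⟩

-- outside a span, a backtick-free suffix is copied to out
theorem pvGoNoTick (s : List Char) (hout : '`' ∉ s) : ∀ out, inlinecodeBGo out none s = out ++ s := by
  induction s with
  | nil => intro out; simp [inlinecodeBGo]
  | cons c rest ih =>
      intro out
      have hc : c ≠ '`' := fun h => hout (h ▸ List.mem_cons_self ..)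
      have hr : '`' ∉ rest := fun h => hout (List.mem_cons_of_mem _ h)
      simp [inlinecodeBGo, hc, ih hr]

-- inside a span, a backtick-free suffix ends without a closer: the lone backtick and buffer come out verbatim
theorem pvGoInNoTick (s : List Char) (hout : '`' ∉ s) : ∀ out b,
    inlinecodeBGo out (some b) s = out ++ '`' :: (b ++ s) := by
  induction s with
  | nil => intro out b; simp [inlinecodeBGo]
  | cons c rest ih =>
      intro out b
      have hc : c ≠ '`' := fun h => hout (h ▸ List.mem_cons_self ..)
      have hr : '`' ∉ rest := fun h => hout (List.mem_cons_of_mem _ h)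
      simp [inlinecodeBGo, hc, ih hr]

-- outside a span, consuming a backtick-free prefix up to the opening backtick
theorem pvGoEnter (p : List Char) (hp : '`' ∉ p) : ∀ t out,
    inlinecodeBGo out none (p ++ '`' :: t) = inlinecodeBGo (out ++ p) (some []) t := by
  induction p with
  | nil => intro t out; simp [inlinecodeBGo]
  | cons c rest ih =>
      intro t out
      have hc : c ≠ '`' := fun h => hp (h ▸ List.mem_cons_self ..)
      have hr : '`' ∉ rest := fun h => hp (List.mem_cons_of_mem _ h)
      simp [inlinecodeBGo, hc, ih hr, List.append_assoc]

-- inside a span, consuming up to the closing backtick flushes the wrapped buffer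
theorem pvGoClose (p : List Char) (hp : '`' ∉ p) : ∀ t out b,
    inlinecodeBGo out (some b) (p ++ '`' :: t)
      = inlinecodeBGo (out ++ pvWrap (b ++ p)) none t := by
  induction p with
  | nil => intro t out b; simp [inlinecodeBGo]
  | cons c rest ih =>
      intro t out b
      have hc : c ≠ '`' := fun h => hp (h ▸ List.mem_cons_self ..)
      have hr : '`' ∉ rest := fun h => hp (List.mem_cons_of_mem _ h)
      simp [inlinecodeBGo, hc, ih hr, List.append_assoc]

-- a found backtick decomposes the string: backtick-free prefix, the tick, the rest
theorem pvFindDecomp (s : List Char) (h : PySem.Chars.find s ['`'] ≠ -1) :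
    '`' ∉ s.take (PySem.Chars.find s ['`']).toNat ∧
    s = s.take (PySem.Chars.find s ['`']).toNat ++ '`' :: s.drop ((PySem.Chars.find s ['`']).toNat + 1) := by
  have hnn : 0 ≤ PySem.Chars.find s ['`'] := by
    have := PySem.Chars.neg_one_le_find s ['`']; omega
  obtain ⟨hpre, hmin⟩ := PySem.Chars.find_spec (s := s) (sub := ['`']) hnn
  set i := (PySem.Chars.find s ['`']).toNat with hi
  have hdrop : s.drop i = '`' :: s.drop (i + 1) := by
    rcases hpre with ⟨t, ht⟩
    have h1 : s.drop i = '`' :: t := by rw [← ht]; rfl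
    have h2 : t = s.drop (i + 1) := by
      have := congrArg (List.drop 1) h1
      simpa [List.drop_drop, Nat.add_comm] using this.symm
    rw [h1, h2]
  refine ⟨?_, ?_⟩
  · intro hmem
    obtain ⟨j, hj, hget⟩ := List.mem_iff_getElem.mp hmem
    have hjb : j < i ∧ j < s.length := by
      simp only [List.length_take] at hj; omega
    apply hmin j hjb.1
    have hds : s.drop j = '`' :: s.drop (j + 1) := by
      have hg : s[j]'hjb.2 = '`' := by
        rw [← hget]; simp [List.getElem_take]
      conv_lhs => rw [List.drop_eq_getElem_cons hjb.2]
      rw [hg]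
    exact ⟨s.drop (j + 1), by rw [hds]; rfl⟩
  · conv_lhs => rw [← List.take_append_drop i s]
    rw [hdrop]

-- the main invariant: the state machine, started outside, appends A's result
theorem pvGoEqA_aux (n : Nat) : ∀ (s : List Char), s.length ≤ n → ∀ out,
    inlinecodeBGo out none s = out ++ inlinecodeA s := by
  induction n with
  | zero =>
      intro s hs out
      have : s = [] := List.eq_nil_of_length_eq_zero (by omega)
      subst this
      rw [inlinecodeA]
      simp [inlinecodeBGo, PySem.Chars.find_eq_neg_one_iff]
  | succ n ih =>
      intro s hs out
      rw [inlinecodeA]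
      by_cases h1 : PySem.Chars.find s ['`'] = -1
      · simp only [h1, dif_pos]
        have : '`' ∉ s := fun hm =>
          ((PySem.Chars.find_ne_neg_one_iff s ['`']).mpr ((pvSingletonInfix '`' s).mpr hm)) h1
        exact pvGoNoTick s this out
      · simp only [h1, dif_neg, not_false_iff]
        have hnn1 : 0 ≤ PySem.Chars.find s ['`'] := by
          have := PySem.Chars.neg_one_le_find s ['`']; omega
        obtain ⟨hp1, hdecomp⟩ := pvFindDecomp s h1
        set i1 := (PySem.Chars.find s ['`']).toNat with hi1
        have hc1 : PySem.Chars.find s ['`'] = (i1 : Int) := (Int.toNat_of_nonneg hnn1).symm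
        have hslice1 : PySem.List.slice s (some (PySem.Chars.find s ['`'] + 1)) none = s.drop (i1 + 1) := by
          rw [hc1]
          have he : (i1 : Int) + 1 = ((i1 + 1 : Nat) : Int) := by push_cast; ring
          rw [he, PySem.List.slice_from_natCast]
        set s1 := s.drop (i1 + 1) with hs1
        by_cases h2 : PySem.Chars.find s1 ['`'] = -1
        · rw [hslice1]
          simp only [h2, dif_pos]
          have hns1 : '`' ∉ s1 := fun hm =>
            ((PySem.Chars.find_ne_neg_one_iff s1 ['`']).mpr ((pvSingletonInfix '`' s1).mpr hm)) h2
          conv_lhs => rw [hdecomp]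
          rw [pvGoEnter _ hp1, pvGoInNoTick _ hns1]
          conv_rhs => rw [hdecomp]
          simp
        · rw [hslice1]
          simp only [h2, dif_neg, not_false_iff]
          have hnn2 : 0 ≤ PySem.Chars.find s1 ['`'] := by
            have := PySem.Chars.neg_one_le_find s1 ['`']; omega
          obtain ⟨hp2, hdecomp2⟩ := pvFindDecomp s1 h2
          set i2 := (PySem.Chars.find s1 ['`']).toNat with hi2
          have hc2 : PySem.Chars.find s1 ['`'] = (i2 : Int) := (Int.toNat_of_nonneg hnn2).symm
          set rest := s1.drop (i2 + 1) with hrest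
          -- identify A's slices
          have hsl0 : PySem.List.slice s none (some (PySem.Chars.find s ['`'])) = s.take i1 :=
            PySem.List.slice_to s hnn1
          have hsl2 : PySem.List.slice s (some (PySem.Chars.find s ['`'] + 1))
              (some (PySem.Chars.find s ['`'] + PySem.Chars.find s1 ['`'] + 1)) = s1.take i2 := by
            rw [hc1, hc2]
            have he1 : (i1 : Int) + 1 = ((i1 + 1 : Nat) : Int) := by push_cast; ring
            have he2 : (i1 : Int) + (i2 : Int) + 1 = ((i1 + 1 : Nat) : Int) + ((i2 : Nat) : Int) := by
              push_cast; ring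
            rw [he1, he2, PySem.List.slice_natCast_add, ← hs1]
          have hsl3 : PySem.List.slice s (some (PySem.Chars.find s ['`'] + PySem.Chars.find s1 ['`'] + 2)) none = rest := by
            rw [hc1, hc2]
            have he : (i1 : Int) + (i2 : Int) + 2 = ((i1 + 1 + (i2 + 1) : Nat) : Int) := by
              push_cast; ring
            rw [he, PySem.List.slice_from_natCast, hrest, hs1, List.drop_drop]
          have hlen : rest.length < s.length := by
            have h0 : 0 < s.length := by
              have := congrArg List.length hdecomp
              simp only [List.length_append, List.length_cons] at this
              omega
            rw [hrest, hs1]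
            simp only [List.length_drop]
            omega
          conv_lhs => rw [hdecomp]
          rw [pvGoEnter _ hp1]
          conv_lhs => rw [hdecomp2]
          rw [pvGoClose _ hp2]
          rw [ih rest (by omega)]
          rw [hsl0, hsl2, hsl3]
          simp [pvWrap, List.append_assoc]

theorem pvGoEqA (s : List Char) : inlinecodeBGo [] none s = inlinecodeA s := by
  simpa using pvGoEqA_aux s.length s le_rfl []

-- ===== VERDICT =====
theorem inlinecode_spec : Claim_equal_inlinecode := by
  intro str0 _
  unfold Spec_inlinecode inlinecode inlinecode_alt
  rw [pvGoEqA]
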